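-- pv_equiv track=rewrite | github.com/rahulsharma0497/Assignment10 | Question5.py | count_substrings_with_same_ending_and_starting_character
-- ===== SOURCE A (Python) =====
-- def count_substrings_with_same_ending_and_starting_character(s):
--   """
--   Returns the count of all contiguous substrings starting and ending with same character in string s.
--
--   Args:
--     s: A string.
--
--   Returns:
--     The count of all contiguous substrings starting and ending with same character in string s.
--   """
--
--   count = 0
--   for i in range(len(s)):
--     if s[i] == s[0]:
--       start = i
--       end = i
--       while start >= 0 and end < len(s) and s[start] == s[end]:
--         start -= 1
--         end += 1
--       count += end - start - 1
--   return count
-- ===== SOURCE B (Python) =====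
-- def count_substrings_with_same_ending_and_starting_character(s):
--     n = len(s)
--     if n == 0:
--         return 0
--     # centers whose character matches s[0]; expand all of them one radius layer at a time
--     alive = [i for i in range(n) if s[i] == s[0]]
--     m = len(alive)
--     p = 0
--     for r in range(1, n + 1):
--         p += len(alive)
--         alive = [i for i in alive if r <= i and i + r < n and s[i - r] == s[i + r]]
--     # each center i contributes its maximal odd-palindrome length 2*t_i - 1; p = sum t_i
--     return 2 * p - m
-- ===== Notes on version B (the rewrite author's own statement) =====
-- stated objective: alternative
-- what changed: A expands each matching center separately with an index-walking while loop; B expands all matching centers simultaneously, one radius layer at a time (filtering a list of surviving centers), and recovers the answer from the identity 2*(sum of radii) - (number of matching centers).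
import Mathlib
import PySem

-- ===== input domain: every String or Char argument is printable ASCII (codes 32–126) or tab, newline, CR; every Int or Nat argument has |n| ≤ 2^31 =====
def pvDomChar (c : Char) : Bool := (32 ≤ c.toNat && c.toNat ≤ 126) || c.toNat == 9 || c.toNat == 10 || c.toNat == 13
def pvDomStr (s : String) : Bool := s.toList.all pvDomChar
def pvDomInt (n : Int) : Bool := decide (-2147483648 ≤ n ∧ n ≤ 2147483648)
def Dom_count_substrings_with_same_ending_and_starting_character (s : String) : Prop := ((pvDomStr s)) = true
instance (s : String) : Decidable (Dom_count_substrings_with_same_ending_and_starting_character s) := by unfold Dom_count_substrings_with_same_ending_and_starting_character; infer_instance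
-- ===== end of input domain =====

-- B replaces A's per-center index-walking while loop by a simultaneous layer-by-layer
-- expansion of all matching centers plus the identity 2*(sum of radii) - (number of centers);
-- objective: alternative algorithm of the same worst-case cost.

-- ===== PORT A =====
-- the inner 'while start >= 0 and end < len(s) and s[start] == s[end]' loop of A
def pvExpandA (cs : List Char) (start e : Int) : Int × Int :=
  if h : 0 ≤ start ∧ e < (cs.length : Int) ∧ PySem.List.pyGet? cs start = PySem.List.pyGet? cs e then
    pvExpandA cs (start - 1) (e + 1)
  else (start, e)
termination_by ((cs.length : Int) - e).toNat
decreasing_by omega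

def count_substrings_with_same_ending_and_starting_character (s : String) : Int :=
  let cs := s.toList
  (PySem.List.pyRange 0 cs.length 1).foldl (fun count i =>
    if PySem.List.pyGet? cs i = PySem.List.pyGet? cs 0 then
      let p := pvExpandA cs i i
      count + (p.2 - p.1 - 1)
    else count) 0

-- ===== PORT B =====
def count_substrings_with_same_ending_and_starting_character_alt (s : String) : Int :=
  let cs := s.toList
  let n : Int := cs.length
  if n = 0 then 0
  else
    let alive := (PySem.List.pyRange 0 n 1).filter
      (fun i => PySem.List.pyGet? cs i == PySem.List.pyGet? cs 0)
    let m : Int := alive.length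
    let st := (PySem.List.pyRange 1 (n + 1) 1).foldl
      (fun (st : Int × List Int) r =>
        (st.1 + st.2.length,
         st.2.filter (fun i => decide (r ≤ i) && decide (i + r < n) &&
           (PySem.List.pyGet? cs (i - r) == PySem.List.pyGet? cs (i + r)))))
      (0, alive)
    2 * st.1 - m

-- ===== PRECONDITION & SPEC =====
def Spec_count_substrings_with_same_ending_and_starting_character (s : String) (out : Int) : Prop := out = count_substrings_with_same_ending_and_starting_character_alt s
instance (s : String) (out : Int) : Decidable (Spec_count_substrings_with_same_ending_and_starting_character s out) := by unfold Spec_count_substrings_with_same_ending_and_starting_character; infer_instance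

-- ===== CLAIM (what is proved, stated in full; the proofs are below) =====
def Claim_equal_count_substrings_with_same_ending_and_starting_character : Prop := ∀ (s : String), Dom_count_substrings_with_same_ending_and_starting_character s → Spec_count_substrings_with_same_ending_and_starting_character s (count_substrings_with_same_ending_and_starting_character s)

-- ===== LEMMAS AND PROOFS =====

-- whether the pair of characters at distance r around center i matches (Nat model)
def pvPair (cs : List Char) (i r : Nat) : Bool :=
  decide (r ≤ i) && decide (i + r < cs.length) && (cs[i - r]? == cs[i + r]?)

theorem pvPair_len_false (cs : List Char) (i : Nat) : pvPair cs i cs.length = false := by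
  simp [pvPair]

-- the number of successful iterations of A's inner while loop at center i
def pvT (cs : List Char) (i : Nat) : Nat :=
  Nat.find (p := fun r => pvPair cs i r = false) ⟨cs.length, pvPair_len_false cs i⟩

theorem pvT_spec (cs : List Char) (i : Nat) : pvPair cs i (pvT cs i) = false :=
  Nat.find_spec (p := fun r => pvPair cs i r = false) ⟨cs.length, pvPair_len_false cs i⟩

theorem pvT_min (cs : List Char) (i : Nat) {k : Nat} (hk : k < pvT cs i) :
    pvPair cs i k = true := by
  have := Nat.find_min (p := fun r => pvPair cs i r = false)
    ⟨cs.length, pvPair_len_false cs i⟩ hk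
  simpa using this

theorem pvT_le_len (cs : List Char) (i : Nat) : pvT cs i ≤ cs.length := by
  by_contra h
  have := pvT_min cs i (k := cs.length) (by omega)
  rw [pvPair_len_false] at this
  exact absurd this (by simp)

theorem pvT_pos (cs : List Char) (i : Nat) (hi : i < cs.length) : 1 ≤ pvT cs i := by
  by_contra h
  have h0 : pvT cs i = 0 := by omega
  have := pvT_spec cs i
  rw [h0] at this
  simp [pvPair, hi] at this

-- the loop condition at state (i-k, i+k) is exactly pvPair
theorem pvCond_iff (cs : List Char) (i k : Nat) :
    (0 ≤ (i : Int) - k ∧ (i : Int) + k < (cs.length : Int) ∧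
      PySem.List.pyGet? cs ((i : Int) - k) = PySem.List.pyGet? cs ((i : Int) + k)) ↔
    pvPair cs i k = true := by
  constructor
  · rintro ⟨h1, h2, h3⟩
    have hk : k ≤ i := by omega
    have e1 : (i : Int) - k = ((i - k : Nat) : Int) := by omega
    have e2 : (i : Int) + k = ((i + k : Nat) : Int) := by omega
    rw [e1, e2, PySem.List.pyGet?_natCast, PySem.List.pyGet?_natCast] at h3
    simp only [pvPair, Bool.and_eq_true, decide_eq_true_eq, beq_iff_eq]
    exact ⟨⟨hk, by omega⟩, h3⟩
  · intro h
    simp only [pvPair, Bool.and_eq_true, decide_eq_true_eq, beq_iff_eq] at h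
    obtain ⟨⟨hk, hlt⟩, he⟩ := h
    refine ⟨by omega, by omega, ?_⟩
    have e1 : (i : Int) - k = ((i - k : Nat) : Int) := by omega
    have e2 : (i : Int) + k = ((i + k : Nat) : Int) := by omega
    rw [e1, e2, PySem.List.pyGet?_natCast, PySem.List.pyGet?_natCast, he]

theorem pvExpandA_spec (cs : List Char) (i : Nat) :
    ∀ (d k : Nat), k + d = pvT cs i →
      pvExpandA cs ((i : Int) - k) ((i : Int) + k) =
        ((i : Int) - pvT cs i, (i : Int) + pvT cs i) := by
  intro d
  induction d with
  | zero =>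
    intro k hk
    rw [pvExpandA]
    have hc : ¬ (0 ≤ (i : Int) - k ∧ (i : Int) + k < (cs.length : Int) ∧
        PySem.List.pyGet? cs ((i : Int) - k) = PySem.List.pyGet? cs ((i : Int) + k)) := by
      rw [pvCond_iff]
      have hkt : k = pvT cs i := by omega
      rw [hkt, pvT_spec]; simp
    rw [dif_neg hc]
    have hkt : k = pvT cs i := by omega
    rw [hkt]
  | succ d ih =>
    intro k hk
    rw [pvExpandA]
    have hc : (0 ≤ (i : Int) - k ∧ (i : Int) + k < (cs.length : Int) ∧
        PySem.List.pyGet? cs ((i : Int) - k) = PySem.List.pyGet? cs ((i : Int) + k)) := by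
      rw [pvCond_iff]
      exact pvT_min cs i (by omega)
    rw [dif_pos hc]
    have e1 : (i : Int) - (k : Int) - 1 = (i : Int) - ((k + 1 : Nat) : Int) := by push_cast; ring
    have e2 : (i : Int) + (k : Int) + 1 = (i : Int) + ((k + 1 : Nat) : Int) := by push_cast; ring
    rw [e1, e2]
    exact ih (k + 1) (by omega)

-- the list of matching centers
def pvMatch (cs : List Char) : List Nat :=
  (List.range cs.length).filter (fun i => cs[i]? == cs[0]?)

theorem pvMatch_lt (cs : List Char) {i : Nat} (hi : i ∈ pvMatch cs) : i < cs.length := by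
  have := List.mem_filter.mp hi
  exact List.mem_range.mp this.1

-- generic: foldl with a guarded add is a sum over the filtered list
theorem pvFoldlIfAdd (l : List Nat) (p : Nat → Bool) (g : Nat → Int) (a : Int) :
    l.foldl (fun acc i => if p i then acc + g i else acc) a
      = a + ((l.filter p).map g).sum := by
  induction l generalizing a with
  | nil => simp
  | cons x l ih =>
    by_cases hx : p x
    · simp [hx, ih, add_assoc]
    · simp [hx, ih]

-- A's value as a sum over matching centers
theorem pvA_char (s : String) :
    count_substrings_with_same_ending_and_starting_character s
      = ((pvMatch s.toList).map (fun i => 2 * (pvT s.toList i : Int) - 1)).sum := by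
  simp only [count_substrings_with_same_ending_and_starting_character]
  rw [show ((s.toList.length : Int)) = ((s.toList.length : Nat) : Int) from rfl,
     PySem.List.pyRange_zero_natCast, List.foldl_map]
  have hexp : ∀ j : Nat, pvExpandA s.toList (j : Int) (j : Int)
      = ((j : Int) - pvT s.toList j, (j : Int) + pvT s.toList j) := by
    intro j
    have := pvExpandA_spec s.toList j (pvT s.toList j) 0 (by omega)
    simpa using this
  have hfun : (fun (count : Int) (i : Nat) =>
        if PySem.List.pyGet? s.toList (i : Int) = PySem.List.pyGet? s.toList 0 then
          count + ((pvExpandA s.toList (i : Int) (i : Int)).2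
            - (pvExpandA s.toList (i : Int) (i : Int)).1 - 1)
        else count)
      = (fun (count : Int) (i : Nat) =>
        if (s.toList[i]? == s.toList[0]?) then count + (2 * (pvT s.toList i : Int) - 1)
        else count) := by
    funext count i
    rw [hexp, PySem.List.pyGet?_natCast, PySem.List.pyGet?_zero]
    by_cases h : s.toList[i]? = s.toList[0]?
    · simp only [h, if_pos, beq_self_eq_true]
      ring_nf
    · simp [h]
  rw [hfun, pvFoldlIfAdd]
  simp [pvMatch]

-- whether center i is still alive after k layers
def pvSurv (cs : List Char) (k i : Nat) : Bool :=
  (List.range k).all (fun j => pvPair cs i (j + 1))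

theorem pvSurv_succ (cs : List Char) (k i : Nat) :
    pvSurv cs (k + 1) i = (pvSurv cs k i && pvPair cs i (k + 1)) := by
  simp [pvSurv, List.range_succ]

theorem pvSurv_iff (cs : List Char) (k i : Nat) (hm : 1 ≤ pvT cs i) :
    pvSurv cs k i = true ↔ k < pvT cs i := by
  constructor
  · intro h
    by_contra hlt
    have hmem : pvT cs i - 1 < k := by omega
    have hall := (List.all_eq_true.mp h) (pvT cs i - 1) (List.mem_range.mpr hmem)
    have he : pvT cs i - 1 + 1 = pvT cs i := by omega
    rw [he, pvT_spec] at hall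
    exact absurd hall (by simp)
  · intro h
    apply List.all_eq_true.mpr
    intro j hj
    exact pvT_min cs i (by have := List.mem_range.mp hj; omega)

-- the Nat model of B's layer loop
def pvStep (cs : List Char) (st : Int × List Nat) (r : Nat) : Int × List Nat :=
  (st.1 + st.2.length, st.2.filter (fun i => pvPair cs i r))

-- B's Int filter predicate at a casted radius and index is the Nat pvPair
theorem pvPredCast (cs : List Char) (r i : Nat) :
    (decide ((r : Int) ≤ (i : Int)) && decide ((i : Int) + (r : Int) < (cs.length : Int)) &&
      (PySem.List.pyGet? cs ((i : Int) - (r : Int)) == PySem.List.pyGet? cs ((i : Int) + (r : Int))))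
    = pvPair cs i r := by
  have d1 : decide ((r : Int) ≤ (i : Int)) = decide (r ≤ i) := by
    rw [decide_eq_decide]; omega
  have d2 : decide ((i : Int) + (r : Int) < (cs.length : Int)) = decide (i + r < cs.length) := by
    rw [decide_eq_decide]; omega
  rw [d1, d2]
  by_cases hr : r ≤ i
  · have e1 : (i : Int) - r = ((i - r : Nat) : Int) := by omega
    have e2 : (i : Int) + r = ((i + r : Nat) : Int) := by omega
    rw [e1, e2, PySem.List.pyGet?_natCast, PySem.List.pyGet?_natCast]
    rfl
  · simp [pvPair, hr]

-- filtering a casted list is casting the filtered list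
theorem pvFilterMapCast (L : List Nat) (p : Int → Bool) (q : Nat → Bool)
    (h : ∀ i, p ((i : Nat) : Int) = q i) :
    (L.map (fun (i : Nat) => (i : Int))).filter p = (L.filter q).map (fun (i : Nat) => (i : Int)) := by
  induction L with
  | nil => simp
  | cons x l ih =>
    simp only [List.map_cons, List.filter_cons, h x]
    by_cases hx : q x
    · simp [hx, ih]
    · simp [hx, ih]

-- B's Int loop on casted states follows the Nat model
theorem pvFold_cast (cs : List Char) (k : Nat) (P : Int) (L : List Nat) :
    (List.range k).foldl
      (fun (st : Int × List Int) (j : Nat) =>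
        (st.1 + (st.2.length : Int),
         st.2.filter (fun i => decide (((j + 1 : Nat) : Int) ≤ i)
           && decide (i + ((j + 1 : Nat) : Int) < (cs.length : Int)) &&
           (PySem.List.pyGet? cs (i - ((j + 1 : Nat) : Int)) ==
            PySem.List.pyGet? cs (i + ((j + 1 : Nat) : Int))))))
      (P, L.map (fun (i : Nat) => (i : Int)))
    = (((List.range k).foldl (fun st j => pvStep cs st (j + 1)) (P, L)).1,
       ((List.range k).foldl (fun st j => pvStep cs st (j + 1)) (P, L)).2.map (fun (i : Nat) => (i : Int))) := by
  induction k generalizing P L with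
  | zero => simp
  | succ k ih =>
    rw [List.range_succ, List.foldl_append, List.foldl_append]
    simp only [List.foldl_cons, List.foldl_nil]
    rw [ih]
    refine Prod.ext ?_ ?_
    · show _ + _ = _
      simp [pvStep]
    · show List.filter _ _ = _
      simp only [pvStep]
      exact pvFilterMapCast _ _ _ (fun i => pvPredCast cs (k + 1) i)

-- invariant for the layer loop in the Nat model
theorem pvModel_inv (cs : List Char) (k : Nat) :
    (List.range k).foldl (fun st j => pvStep cs st (j + 1)) (0, pvMatch cs)
      = (((∑ j ∈ Finset.range k, ((pvMatch cs).filter (pvSurv cs j)).length : Nat) : Int),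
         (pvMatch cs).filter (pvSurv cs k)) := by
  induction k with
  | zero =>
    simp only [List.range_zero, List.foldl_nil, Finset.range_zero, Finset.sum_empty, Nat.cast_zero]
    refine Prod.ext rfl ?_
    exact (List.filter_eq_self.mpr (fun a _ => by simp [pvSurv])).symm
  | succ k ih =>
    rw [List.range_succ, List.foldl_append, ih]
    simp only [List.foldl_cons, List.foldl_nil, pvStep]
    refine Prod.ext ?_ ?_
    · show _ + _ = _
      push_cast [Finset.sum_range_succ]
      ring
    · show List.filter _ _ = _
      rw [List.filter_filter]
      apply List.filter_congr
      intro i _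
      rw [pvSurv_succ, Bool.and_comm]

-- swap the double sum: layers-first equals centers-first
theorem pvSwap (L : List Nat) (n : Nat) (p : Nat → Nat → Bool) :
    (∑ k ∈ Finset.range n, (L.filter (p k)).length)
      = (L.map (fun i => ∑ k ∈ Finset.range n, (if p k i then 1 else 0))).sum := by
  induction L with
  | nil => simp
  | cons x l ih =>
    simp only [List.map_cons, List.sum_cons, ← ih]
    rw [← Finset.sum_add_distrib]
    apply Finset.sum_congr rfl
    intro k _
    simp only [List.filter_cons]
    by_cases h : p k x <;> simp [h] <;> omega

theorem pvCount_lt (t n : Nat) :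
    (∑ k ∈ Finset.range n, (if k < t then (1 : Nat) else 0)) = min t n := by
  induction n with
  | zero => simp
  | succ n ih =>
    rw [Finset.sum_range_succ, ih]
    by_cases h : n < t <;> simp [h] <;> omega

-- final sum identity over the matching centers
theorem pvSum_final (L : List Nat) (f : Nat → Nat) :
    (L.map (fun i => 2 * (f i : Int) - 1)).sum
      = 2 * (((L.map f).sum : Nat) : Int) - (L.length : Int) := by
  induction L with
  | nil => simp
  | cons x l ih =>
    simp only [List.map_cons, List.sum_cons, List.length_cons, ih]
    push_cast
    ring

-- B's value as the same sum
theorem pvAlive_eq (cs : List Char) :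
    (PySem.List.pyRange 0 (cs.length : Int) 1).filter
        (fun i => PySem.List.pyGet? cs i == PySem.List.pyGet? cs 0)
      = (pvMatch cs).map (fun (i : Nat) => (i : Int)) := by
  rw [PySem.List.pyRange_zero_natCast, pvMatch]
  apply pvFilterMapCast
  intro j
  rw [PySem.List.pyGet?_natCast, PySem.List.pyGet?_zero]

theorem pvB_char (s : String) :
    count_substrings_with_same_ending_and_starting_character_alt s
      = ((pvMatch s.toList).map (fun i => 2 * (pvT s.toList i : Int) - 1)).sum := by
  simp only [count_substrings_with_same_ending_and_starting_character_alt]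
  by_cases h0 : ((s.toList.length : Int)) = 0
  · rw [if_pos h0]
    have hnil : s.toList = [] := List.length_eq_zero_iff.mp (by omega)
    simp [pvMatch, hnil]
  · rw [if_neg h0]
    rw [pvAlive_eq]
    have hrange : PySem.List.pyRange 1 ((s.toList.length : Int) + 1) 1
        = (List.range s.toList.length).map (fun j => ((j + 1 : Nat) : Int)) := by
      rw [PySem.List.pyRange_one]
      have : ((s.toList.length : Int) + 1 - 1).toNat = s.toList.length := by omega
      rw [this]
      apply List.map_congr_left
      intro j _
      push_cast
      ring
    rw [hrange, List.foldl_map]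
    rw [pvFold_cast, pvModel_inv]
    rw [pvSwap]
    have hmap : (pvMatch s.toList).map
          (fun i => ∑ k ∈ Finset.range s.toList.length, (if pvSurv s.toList k i then 1 else 0))
        = (pvMatch s.toList).map (pvT s.toList) := by
      apply List.map_congr_left
      intro i hi
      have hi' : i < s.toList.length := pvMatch_lt s.toList hi
      have hm : 1 ≤ pvT s.toList i := pvT_pos s.toList i hi'
      have : ∀ k ∈ Finset.range s.toList.length,
          (if pvSurv s.toList k i then (1:Nat) else 0) = (if k < pvT s.toList i then 1 else 0) := by
        intro k _
        by_cases h : pvSurv s.toList k i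
        · rw [if_pos h, if_pos ((pvSurv_iff s.toList k i hm).mp h)]
        · rw [if_neg h, if_neg (fun hlt => h ((pvSurv_iff s.toList k i hm).mpr hlt))]
      rw [Finset.sum_congr rfl this, pvCount_lt]
      exact Nat.min_eq_left (pvT_le_len s.toList i)
    rw [hmap, pvSum_final]
    simp [List.length_map]

-- ===== VERDICT (by name: the statement is the Claim_ definition above) =====
theorem count_substrings_with_same_ending_and_starting_character_spec : Claim_equal_count_substrings_with_same_ending_and_starting_character := by
  intro s _
  unfold Spec_count_substrings_with_same_ending_and_starting_character
  rw [pvA_char, pvB_char]
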